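-- pv_equiv track=rewrite | github.com/Andyh14/Python-Practice | EXAM2/norgard.py | norgard_sequence
-- ===== SOURCE A (Python) =====
-- STARTING_NUMBER_ONE = 1
--
-- STARTING_NUMBER_TWO = 2
--
-- STARTING_NUMBER_THREE = 3
--
-- def norgard_sequence(number):
--     """
--     This function will output the value after a number is put through Norgard's sequence.
--     :param number: A integer which is used to calculate the value of Norgand's sequence at that integer.
--     :return: A number value that corresponds with the given number in Norgand's sequence.
--     """
--     # error check just in case
--     if number < 0:
--         return 0
--
--     # base case
--     if number == 0:
--         return 0
--
--     # other specific cases for the algorithm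
--     elif number == STARTING_NUMBER_ONE:
--         return 1
--     elif number == STARTING_NUMBER_TWO:
--         return -1
--     elif number == STARTING_NUMBER_THREE:
--         return 2
--
--     elif number > 0:
--         # odd or even recursive algorithm equations
--         if number % 2 == 0:
--             return norgard_sequence(number // 2) * -1
--         elif number % 2 != 0:
--             return 1 + norgard_sequence((number - 1) // 2)
-- ===== SOURCE B (Python) =====
-- def norgard_sequence(number):
--     if number < 0:
--         return 0
--     steps = []
--     while number > 1:
--         steps.append(number % 2 == 0)
--         number //= 2
--     value = number
--     for is_even in reversed(steps):
--         value = -value if is_even else value + 1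
--     return value
-- ===== Notes on version B (the rewrite author's own statement) =====
-- stated objective: alternative
-- what changed: Replaces the recursion with an explicit iterative pass that records the parity of each halving step and then folds the recorded operations back-to-front, starting from the base value; the literal cases for 2 and 3 disappear.
import Mathlib
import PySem

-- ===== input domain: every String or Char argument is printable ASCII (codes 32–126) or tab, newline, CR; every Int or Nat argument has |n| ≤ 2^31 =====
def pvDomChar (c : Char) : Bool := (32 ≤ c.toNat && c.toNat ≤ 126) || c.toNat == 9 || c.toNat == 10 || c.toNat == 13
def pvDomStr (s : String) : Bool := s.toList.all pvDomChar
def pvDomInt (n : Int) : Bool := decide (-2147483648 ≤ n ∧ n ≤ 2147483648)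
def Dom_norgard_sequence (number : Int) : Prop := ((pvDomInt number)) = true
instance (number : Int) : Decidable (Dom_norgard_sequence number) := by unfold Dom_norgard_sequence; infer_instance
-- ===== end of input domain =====

-- ===== PORT A =====
def norgard_sequence (number : Int) : Int :=
  if number < 0 then 0
  else if number = 0 then 0
  else if number = 1 then 1
  else if number = 2 then -1
  else if number = 3 then 2
  else if number > 0 then
    if PySem.Int.mod number 2 = 0 then
      norgard_sequence (PySem.Int.floordiv number 2) * -1
    else
      1 + norgard_sequence (PySem.Int.floordiv (number - 1) 2)
  else 0  -- unreachable: every number > 3 satisfies number > 0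
termination_by number.toNat
decreasing_by
  all_goals
    rw [PySem.Int.floordiv_eq_ediv_of_pos (by omega)]
    omega

-- ===== PORT B =====
-- while-loop of Source B: records parities, halves; returns (final number, steps)
def norgardLoop (number : Int) (steps : List Bool) : Int × List Bool :=
  if number > 1 then
    norgardLoop (PySem.Int.floordiv number 2) (steps ++ [decide (PySem.Int.mod number 2 = 0)])
  else (number, steps)
termination_by number.toNat
decreasing_by
  rw [PySem.Int.floordiv_eq_ediv_of_pos (by omega)]
  omega

def norgard_sequence_alt (number : Int) : Int :=
  if number < 0 then 0
  else
    let (value, steps) := norgardLoop number []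
    steps.reverse.foldl (fun v is_even => if is_even then -v else v + 1) value

-- ===== PRECONDITION & SPEC =====
def Spec_norgard_sequence (number : Int) (out : Int) : Prop := out = norgard_sequence_alt number
instance (number : Int) (out : Int) : Decidable (Spec_norgard_sequence number out) := by unfold Spec_norgard_sequence; infer_instance

-- ===== CLAIM (what is proved, stated in full; the proofs are below) =====
def Claim_equal_norgard_sequence : Prop := ∀ (number : Int), Dom_norgard_sequence number → Spec_norgard_sequence number (norgard_sequence number)

-- ===== LEMMAS AND PROOFS =====

-- ===== VERDICT (by name: the statement is the Claim_ definition above) =====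
-- the accumulator of norgardLoop is append-only
theorem norgardLoop_acc (number : Int) (s : List Bool) :
    norgardLoop number s = ((norgardLoop number []).1, s ++ (norgardLoop number []).2) := by
  by_cases h : number > 1
  · rw [norgardLoop, if_pos h]
    conv_rhs => rw [norgardLoop, if_pos h]
    rw [norgardLoop_acc (PySem.Int.floordiv number 2) (s ++ [decide (PySem.Int.mod number 2 = 0)]),
        norgardLoop_acc (PySem.Int.floordiv number 2) ([] ++ [decide (PySem.Int.mod number 2 = 0)])]
    simp
  · rw [norgardLoop, if_neg h]
    conv_rhs => rw [norgardLoop, if_neg h]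
    simp
termination_by number.toNat
decreasing_by
  all_goals
    rw [PySem.Int.floordiv_eq_ediv_of_pos (by omega)]
    omega

-- base of the loop: for 0 ≤ number ≤ 1 the alt port returns number itself
theorem alt_base (number : Int) (h0 : ¬ number < 0) (h1 : ¬ number > 1) :
    norgard_sequence_alt number = number := by
  rw [norgard_sequence_alt, if_neg h0, norgardLoop, if_neg h1]
  simp

-- the alt port satisfies A's recurrence for number > 1
theorem alt_step (number : Int) (h : number > 1) :
    norgard_sequence_alt number =
      (if PySem.Int.mod number 2 = 0 then -(norgard_sequence_alt (PySem.Int.floordiv number 2))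
       else norgard_sequence_alt (PySem.Int.floordiv number 2) + 1) := by
  have hhalf : ¬ PySem.Int.floordiv number 2 < 0 := by
    rw [PySem.Int.floordiv_eq_ediv_of_pos (by omega)]
    omega
  rw [norgard_sequence_alt, if_neg (by omega : ¬ number < 0), norgardLoop, if_pos h,
      norgardLoop_acc (PySem.Int.floordiv number 2) ([] ++ [decide (PySem.Int.mod number 2 = 0)]),
      norgard_sequence_alt, if_neg hhalf]
  simp

theorem a_eq_alt (number : Int) : norgard_sequence number = norgard_sequence_alt number := by
  rw [norgard_sequence]
  by_cases h0 : number < 0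
  · rw [if_pos h0, norgard_sequence_alt, if_pos h0]
  rw [if_neg h0]
  by_cases hz : number = 0
  · rw [if_pos hz, alt_base number h0 (by omega), hz]
  rw [if_neg hz]
  by_cases h1 : number = 1
  · rw [if_pos h1, alt_base number h0 (by omega), h1]
  rw [if_neg h1]
  have hm : PySem.Int.mod number 2 = number % 2 := PySem.Int.mod_eq_emod_of_pos (by omega)
  have hd : PySem.Int.floordiv number 2 = number / 2 := PySem.Int.floordiv_eq_ediv_of_pos (by omega)
  by_cases h2 : number = 2
  · rw [if_pos h2, h2, alt_step 2 (by omega)]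
    have : PySem.Int.floordiv (2:Int) 2 = 1 := by
      rw [PySem.Int.floordiv_eq_ediv_of_pos (by omega)]
      decide
    rw [if_pos (by rw [PySem.Int.mod_eq_emod_of_pos (by omega)]; decide), this,
        alt_base 1 (by omega) (by omega)]
  rw [if_neg h2]
  by_cases h3 : number = 3
  · rw [if_pos h3, h3, alt_step 3 (by omega)]
    have : PySem.Int.floordiv (3:Int) 2 = 1 := by
      rw [PySem.Int.floordiv_eq_ediv_of_pos (by omega)]; decide
    rw [if_neg (by rw [PySem.Int.mod_eq_emod_of_pos (by omega)]; decide), this,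
        alt_base 1 (by omega) (by omega)]
    norm_num
  rw [if_neg h3, if_pos (by omega : number > 0), alt_step number (by omega)]
  by_cases hp : PySem.Int.mod number 2 = 0
  · rw [if_pos hp, if_pos hp, a_eq_alt (PySem.Int.floordiv number 2)]
    ring
  · rw [if_neg hp, if_neg hp, a_eq_alt (PySem.Int.floordiv (number - 1) 2)]
    have heq : PySem.Int.floordiv (number - 1) 2 = PySem.Int.floordiv number 2 := by
      rw [hd, PySem.Int.floordiv_eq_ediv_of_pos (by omega : (0:Int) < 2)]
      omega
    rw [heq]
    ring
termination_by number.toNat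
decreasing_by
  all_goals
    rw [PySem.Int.floordiv_eq_ediv_of_pos (by omega)]
    omega

-- ===== VERDICT (by name: the statement is the Claim_ definition above) =====
theorem norgard_sequence_spec : Claim_equal_norgard_sequence := by
  intro number _
  unfold Spec_norgard_sequence
  exact a_eq_alt number
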